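-- pv_equiv track=rewrite | github.com/dassowmd/Neon_CRM_SDK | src/neon_crm/migration_tools/fast_discovery.py | _suggest_target_fields
-- ===== SOURCE A (Python) =====
-- from typing import Dict, Any, List, Optional, Set, Union, Tuple
--
-- def _suggest_target_fields(source_field: str, group_name: str) -> List[str]:
--     """Suggest potential target fields based on naming patterns."""
--
--     suggestions = []
--
--     # Common consolidation patterns
--     if group_name == "V":
--         # V-field consolidation patterns - using standardized field names
--         if any(
--             keyword in source_field.lower()
--             for keyword in [
--                 "skill",
--                 "talent",
--                 "ability",
--                 "data",
--                 "entry",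
--                 "admin",
--                 "office",
--                 "technology",
--                 "tech",
--             ]
--         ):
--             suggestions.append("V-Volunteer Skills")
--         elif any(
--             keyword in source_field.lower()
--             for keyword in [
--                 "interest",
--                 "want",
--                 "like",
--                 "event",
--                 "planning",
--                 "food",
--                 "hospitality",
--             ]
--         ):
--             suggestions.append("V-Volunteer Interests")
--         elif any(
--             keyword in source_field.lower()
--             for keyword in [
--                 "campaign",
--                 "election",
--                 "vote",
--                 "canvass",
--                 "phone",
--                 "text",
--                 "banking",
--             ]
--         ):
--             suggestions.append("V-Volunteer Campaign & Election Activities")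
--         elif any(
--             keyword in source_field.lower()
--             for keyword in ["availability", "time", "schedule"]
--         ):
--             suggestions.append("V-Volunteer Availability")
--         else:
--             # Generic V-field suggestions - primary standardized categories
--             suggestions.extend(
--                 [
--                     "V-Volunteer Skills",
--                     "V-Volunteer Campaign & Election Activities",
--                     "V-Volunteer Interests",
--                     "V-Volunteer Availability",
--                 ]
--             )
--
--     elif group_name == "Custom":
--         # Custom field consolidation
--         suggestions.append(f"{group_name}-Consolidated")
--
--     else:
--         # Generic suggestions
--         suggestions.append(f"{group_name}-Consolidated")
--
--     return suggestions[:3]  # Limit to top 3 suggestions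
-- ===== SOURCE B (Python) =====
-- _FALLBACK = [
--     "V-Volunteer Skills",
--     "V-Volunteer Campaign & Election Activities",
--     "V-Volunteer Interests",
-- ]
--
-- # Flat keyword -> (priority, label) map; lower priority wins.
-- _KEYWORDS = {
--     "skill": (0, "V-Volunteer Skills"),
--     "talent": (0, "V-Volunteer Skills"),
--     "ability": (0, "V-Volunteer Skills"),
--     "data": (0, "V-Volunteer Skills"),
--     "entry": (0, "V-Volunteer Skills"),
--     "admin": (0, "V-Volunteer Skills"),
--     "office": (0, "V-Volunteer Skills"),
--     "technology": (0, "V-Volunteer Skills"),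
--     "tech": (0, "V-Volunteer Skills"),
--     "interest": (1, "V-Volunteer Interests"),
--     "want": (1, "V-Volunteer Interests"),
--     "like": (1, "V-Volunteer Interests"),
--     "event": (1, "V-Volunteer Interests"),
--     "planning": (1, "V-Volunteer Interests"),
--     "food": (1, "V-Volunteer Interests"),
--     "hospitality": (1, "V-Volunteer Interests"),
--     "campaign": (2, "V-Volunteer Campaign & Election Activities"),
--     "election": (2, "V-Volunteer Campaign & Election Activities"),
--     "vote": (2, "V-Volunteer Campaign & Election Activities"),
--     "canvass": (2, "V-Volunteer Campaign & Election Activities"),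
--     "phone": (2, "V-Volunteer Campaign & Election Activities"),
--     "text": (2, "V-Volunteer Campaign & Election Activities"),
--     "banking": (2, "V-Volunteer Campaign & Election Activities"),
--     "availability": (3, "V-Volunteer Availability"),
--     "time": (3, "V-Volunteer Availability"),
--     "schedule": (3, "V-Volunteer Availability"),
-- }
--
--
-- def _suggest_target_fields(source_field: str, group_name: str):
--     """Suggest potential target fields based on naming patterns."""
--     if group_name != "V":
--         return [group_name + "-Consolidated"]
--     low = source_field.lower()
--     best = None
--     for kw, ranked in _KEYWORDS.items():
--         if kw in low and (best is None or ranked[0] < best[0]):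
--             best = ranked
--     if best is None:
--         return list(_FALLBACK)
--     return [best[1]]
-- ===== Notes on version B (the rewrite author's own statement) =====
-- stated objective: alternative
-- what changed: Instead of A's four-branch first-match elif chain over keyword groups, B does one exhaustive pass over a flat keyword->(priority,label) dict, keeping the minimum-priority matching entry, merges the identical Custom/else branches into one early return, and returns the literal 3-element fallback with no slicing.
import Mathlib
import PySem

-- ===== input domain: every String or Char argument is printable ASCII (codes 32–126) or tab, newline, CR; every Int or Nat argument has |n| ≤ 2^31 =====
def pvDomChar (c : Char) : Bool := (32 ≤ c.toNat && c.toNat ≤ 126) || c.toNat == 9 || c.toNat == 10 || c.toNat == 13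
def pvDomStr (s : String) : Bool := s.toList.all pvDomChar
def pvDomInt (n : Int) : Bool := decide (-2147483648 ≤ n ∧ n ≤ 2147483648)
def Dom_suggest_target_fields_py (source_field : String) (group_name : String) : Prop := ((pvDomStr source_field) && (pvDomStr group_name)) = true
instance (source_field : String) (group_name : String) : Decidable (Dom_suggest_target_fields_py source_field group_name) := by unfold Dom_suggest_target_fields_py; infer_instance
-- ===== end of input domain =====

-- B replaces A's first-match elif chain over keyword groups by a single exhaustive
-- pass over a flat keyword -> (priority, label) map keeping the minimum-priority
-- match (objective: alternative decomposition). Same return value everywhere.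

-- ===== PORT A =====
-- literal transliteration: build `suggestions`, then return suggestions[:3]
def suggest_target_fields_py (source_field : String) (group_name : String) : List String :=
  let suggestions : List String := []
  let suggestions :=
    if group_name == "V" then
      if ["skill", "talent", "ability", "data", "entry", "admin", "office",
          "technology", "tech"].any
            (fun keyword => PySem.Str.isIn keyword (PySem.Str.lower source_field)) then
        suggestions ++ ["V-Volunteer Skills"]
      else if ["interest", "want", "like", "event", "planning", "food",
               "hospitality"].any
            (fun keyword => PySem.Str.isIn keyword (PySem.Str.lower source_field)) then
        suggestions ++ ["V-Volunteer Interests"]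
      else if ["campaign", "election", "vote", "canvass", "phone", "text",
               "banking"].any
            (fun keyword => PySem.Str.isIn keyword (PySem.Str.lower source_field)) then
        suggestions ++ ["V-Volunteer Campaign & Election Activities"]
      else if ["availability", "time", "schedule"].any
            (fun keyword => PySem.Str.isIn keyword (PySem.Str.lower source_field)) then
        suggestions ++ ["V-Volunteer Availability"]
      else
        suggestions ++ ["V-Volunteer Skills",
                        "V-Volunteer Campaign & Election Activities",
                        "V-Volunteer Interests",
                        "V-Volunteer Availability"]
    else if group_name == "Custom" then
      suggestions ++ [group_name ++ "-Consolidated"]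
    else
      suggestions ++ [group_name ++ "-Consolidated"]
  PySem.List.slice suggestions none (some 3)

-- ===== PORT B =====
-- the flat keyword -> (priority, label) dict, in insertion order
def pvKeywords : List (String × (Int × String)) :=
  [("skill", (0, "V-Volunteer Skills")),
   ("talent", (0, "V-Volunteer Skills")),
   ("ability", (0, "V-Volunteer Skills")),
   ("data", (0, "V-Volunteer Skills")),
   ("entry", (0, "V-Volunteer Skills")),
   ("admin", (0, "V-Volunteer Skills")),
   ("office", (0, "V-Volunteer Skills")),
   ("technology", (0, "V-Volunteer Skills")),
   ("tech", (0, "V-Volunteer Skills")),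
   ("interest", (1, "V-Volunteer Interests")),
   ("want", (1, "V-Volunteer Interests")),
   ("like", (1, "V-Volunteer Interests")),
   ("event", (1, "V-Volunteer Interests")),
   ("planning", (1, "V-Volunteer Interests")),
   ("food", (1, "V-Volunteer Interests")),
   ("hospitality", (1, "V-Volunteer Interests")),
   ("campaign", (2, "V-Volunteer Campaign & Election Activities")),
   ("election", (2, "V-Volunteer Campaign & Election Activities")),
   ("vote", (2, "V-Volunteer Campaign & Election Activities")),
   ("canvass", (2, "V-Volunteer Campaign & Election Activities")),
   ("phone", (2, "V-Volunteer Campaign & Election Activities")),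
   ("text", (2, "V-Volunteer Campaign & Election Activities")),
   ("banking", (2, "V-Volunteer Campaign & Election Activities")),
   ("availability", (3, "V-Volunteer Availability")),
   ("time", (3, "V-Volunteer Availability")),
   ("schedule", (3, "V-Volunteer Availability"))]

-- one loop iteration: keep `best`, the minimum-priority matching entry so far
def pvStep (low : String) (best : Option (Int × String)) (p : String × (Int × String)) :
    Option (Int × String) :=
  if PySem.Str.isIn p.1 low then
    match best with
    | none => some p.2
    | some b => if p.2.1 < b.1 then some p.2 else some b
  else best

def suggest_target_fields_py_alt (source_field : String) (group_name : String) : List String :=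
  if group_name != "V" then [group_name ++ "-Consolidated"]
  else
    let low := PySem.Str.lower source_field
    match pvKeywords.foldl (pvStep low) none with
    | none => ["V-Volunteer Skills",
               "V-Volunteer Campaign & Election Activities",
               "V-Volunteer Interests"]
    | some b => [b.2]

-- ===== PRECONDITION & SPEC =====
def Spec_suggest_target_fields_py (source_field : String) (group_name : String) (out : List String) : Prop := out = suggest_target_fields_py_alt source_field group_name
instance (source_field : String) (group_name : String) (out : List String) : Decidable (Spec_suggest_target_fields_py source_field group_name out) := by unfold Spec_suggest_target_fields_py; infer_instance

-- ===== CLAIM (what is proved, stated in full; the proofs are below) =====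
def Claim_equal_suggest_target_fields_py : Prop := ∀ (source_field : String) (group_name : String), Dom_suggest_target_fields_py source_field group_name → Spec_suggest_target_fields_py source_field group_name (suggest_target_fields_py source_field group_name)

-- ===== LEMMAS AND PROOFS =====

-- an already-minimal accumulator survives the rest of the fold
theorem pvStep_keep (low : String) (b : Int × String) :
    ∀ (l : List (String × (Int × String))), (∀ p ∈ l, ¬ p.2.1 < b.1) →
      l.foldl (pvStep low) (some b) = some b := by
  intro l
  induction l with
  | nil => intro _; rfl
  | cons p t ih =>
      intro h
      simp only [List.foldl_cons, pvStep]
      have hp := h p (by simp)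
      by_cases hin : PySem.Str.isIn p.1 low <;> simp [hp, ih (fun q hq => h q (by simp [hq]))]

-- a homogeneous category block: result is its common entry iff some keyword matches
theorem pvStep_cat (low : String) (i : Int) (lab : String) :
    ∀ (l : List (String × (Int × String))), (∀ p ∈ l, p.2 = (i, lab)) →
      l.foldl (pvStep low) none
        = (if l.any (fun p => PySem.Str.isIn p.1 low) then some (i, lab) else none) := by
  intro l
  induction l with
  | nil => intro _; rfl
  | cons p t ih =>
      intro h
      have hp := h p (by simp)
      simp only [List.foldl_cons, pvStep, List.any_cons]
      by_cases hin : PySem.Str.isIn p.1 low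
      · simp only [hin, hp, Bool.true_or, if_pos]
        exact pvStep_keep low (i, lab) t (by intro q hq; rw [h q (by simp [hq])]; omega)
      · rw [if_neg hin, ih (fun q hq => h q (by simp [hq]))]
        have hf : PySem.Str.isIn p.1 low = false := Bool.eq_false_iff.mpr hin
        simp only [hf, Bool.false_or]

-- ===== VERDICT (by name: the statement is the Claim_ definition above) =====
theorem suggest_target_fields_py_spec : Claim_equal_suggest_target_fields_py := by
  intro source_field group_name _
  unfold Spec_suggest_target_fields_py suggest_target_fields_py suggest_target_fields_py_alt
  by_cases hV : group_name = "V"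
  · subst hV
    set low := PySem.Str.lower source_field with hlow
    have hsplit : pvKeywords
        = pvKeywords.take 9 ++ ((pvKeywords.drop 9).take 7
          ++ ((pvKeywords.drop 16).take 7 ++ pvKeywords.drop 23)) := by decide
    rw [hsplit]
    simp only [List.foldl_append]
    -- the four any-tests over the pair blocks ARE A's keyword tests
    have e0 : (pvKeywords.take 9).any (fun p => PySem.Str.isIn p.1 low)
        = (["skill", "talent", "ability", "data", "entry", "admin", "office",
            "technology", "tech"] : List String).any (fun keyword => PySem.Str.isIn keyword low) := rfl
    have e1 : ((pvKeywords.drop 9).take 7).any (fun p => PySem.Str.isIn p.1 low)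
        = (["interest", "want", "like", "event", "planning", "food",
            "hospitality"] : List String).any (fun keyword => PySem.Str.isIn keyword low) := rfl
    have e2 : ((pvKeywords.drop 16).take 7).any (fun p => PySem.Str.isIn p.1 low)
        = (["campaign", "election", "vote", "canvass", "phone", "text",
            "banking"] : List String).any (fun keyword => PySem.Str.isIn keyword low) := rfl
    have e3 : (pvKeywords.drop 23).any (fun p => PySem.Str.isIn p.1 low)
        = (["availability", "time", "schedule"] : List String).any
            (fun keyword => PySem.Str.isIn keyword low) := rfl
    rw [pvStep_cat low 0 "V-Volunteer Skills" _ (by decide), e0]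
    by_cases h0 : (["skill", "talent", "ability", "data", "entry", "admin", "office",
        "technology", "tech"] : List String).any (fun keyword => PySem.Str.isIn keyword low)
    · simp only [if_pos h0]
      rw [pvStep_keep low _ _ (by decide), pvStep_keep low _ _ (by decide),
          pvStep_keep low _ _ (by decide)]
      simp [PySem.List.slice]
    · simp only [if_neg h0]
      rw [pvStep_cat low 1 "V-Volunteer Interests" _ (by decide), e1]
      by_cases h1 : (["interest", "want", "like", "event", "planning", "food",
          "hospitality"] : List String).any (fun keyword => PySem.Str.isIn keyword low)
      · simp only [if_pos h1]
        rw [pvStep_keep low _ _ (by decide), pvStep_keep low _ _ (by decide)]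
        simp [PySem.List.slice]
      · simp only [if_neg h1]
        rw [pvStep_cat low 2 "V-Volunteer Campaign & Election Activities" _ (by decide), e2]
        by_cases h2 : (["campaign", "election", "vote", "canvass", "phone", "text",
            "banking"] : List String).any (fun keyword => PySem.Str.isIn keyword low)
        · simp only [if_pos h2]
          rw [pvStep_keep low _ _ (by decide)]
          simp [PySem.List.slice]
        · simp only [if_neg h2]
          rw [pvStep_cat low 3 "V-Volunteer Availability" _ (by decide), e3]
          by_cases h3 : (["availability", "time", "schedule"] : List String).any
              (fun keyword => PySem.Str.isIn keyword low)
          · simp only [if_pos h3]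
            simp [PySem.List.slice]
          · simp only [if_neg h3]
            simp [PySem.List.slice]
  · have h1 : (group_name == "V") = false := by simp [hV]
    simp only [h1, bne, Bool.not_false, Bool.false_eq_true, if_false]
    by_cases hC : group_name = "Custom" <;> simp [hC, PySem.List.slice]
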